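-- pv_equiv track=rewrite | github.com/selavy/plszip | sandbox/tools/gen_tables.py | get_length_extra_bits
-- ===== SOURCE A (Python) =====
-- def get_length_extra_bits(length):
--     length_cutoffs = [
--         3,
--         4,
--         5,
--         6,
--         7,
--         8,
--         9,
--         10,
--         12,
--         14,
--         16,
--         18,
--         22,
--         26,
--         30,
--         34,
--         42,
--         50,
--         58,
--         66,
--         82,
--         98,
--         114,
--         130,
--         162,
--         194,
--         226,
--         257,
--         258,
--     ]
--     extra_bits = [
--         0,
--         0,
--         0,
--         0,
--         0,
--         0,
--         0,
--         0,
--         1,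
--         1,
--         1,
--         1,
--         2,
--         2,
--         2,
--         2,
--         3,
--         3,
--         3,
--         3,
--         4,
--         4,
--         4,
--         4,
--         5,
--         5,
--         5,
--         5,
--         0,
--     ]
--     for cutoff, extra in zip(length_cutoffs, extra_bits):
--         if length <= cutoff:
--             return extra
--     else:
--         raise ValueError
-- ===== SOURCE B (Python) =====
-- LENGTH_CUTOFFS = [3, 4, 5, 6, 7, 8, 9, 10, 12, 14, 16, 18, 22, 26, 30,
--                   34, 42, 50, 58, 66, 82, 98, 114, 130, 162, 194, 226, 257, 258]
-- EXTRA_BITS = [0, 0, 0, 0, 0, 0, 0, 0, 1, 1, 1, 1, 2, 2, 2, 2,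
--               3, 3, 3, 3, 4, 4, 4, 4, 5, 5, 5, 5, 0]
--
--
-- def get_length_extra_bits(length):
--     # binary search for the first cutoff >= length
--     lo, hi = 0, len(LENGTH_CUTOFFS)
--     while lo < hi:
--         mid = (lo + hi) // 2
--         if LENGTH_CUTOFFS[mid] < length:
--             lo = mid + 1
--         else:
--             hi = mid
--     if lo == len(LENGTH_CUTOFFS):
--         raise ValueError
--     return EXTRA_BITS[lo]
-- ===== Notes on version B (the rewrite author's own statement) =====
-- stated objective: alternative
-- what changed: Replaces the sequential scan over the zipped cutoff/extra-bits tables by a hand-written binary search (bisect_left) on the ascending cutoff table, indexing the extra-bits table once.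
import Mathlib
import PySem

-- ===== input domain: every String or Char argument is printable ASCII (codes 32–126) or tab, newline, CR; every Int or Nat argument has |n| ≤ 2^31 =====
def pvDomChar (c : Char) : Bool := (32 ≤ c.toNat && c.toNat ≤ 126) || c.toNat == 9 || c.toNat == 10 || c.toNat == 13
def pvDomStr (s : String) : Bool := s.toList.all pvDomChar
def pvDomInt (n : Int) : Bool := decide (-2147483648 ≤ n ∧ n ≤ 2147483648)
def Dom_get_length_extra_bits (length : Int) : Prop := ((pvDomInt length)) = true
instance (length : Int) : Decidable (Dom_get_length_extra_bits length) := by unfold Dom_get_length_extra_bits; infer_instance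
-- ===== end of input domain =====

-- B replaces A's sequential scan of the cutoff table with a binary search; same tables, same result.

-- ===== PORT A =====
def pvLengthCutoffs : List Int :=
  [3, 4, 5, 6, 7, 8, 9, 10, 12, 14, 16, 18, 22, 26, 30,
   34, 42, 50, 58, 66, 82, 98, 114, 130, 162, 194, 226, 257, 258]

def pvExtraBits : List Int :=
  [0, 0, 0, 0, 0, 0, 0, 0, 1, 1, 1, 1, 2, 2, 2, 2,
   3, 3, 3, 3, 4, 4, 4, 4, 5, 5, 5, 5, 0]

-- the 'for cutoff, extra in zip(...)' loop with its early return; [] is the ValueError case (excluded by Pre_)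
def pvScan (length : Int) : List (Int × Int) → Int
  | [] => 0
  | (cutoff, extra) :: rest => if length ≤ cutoff then extra else pvScan length rest

def get_length_extra_bits (length : Int) : Int :=
  pvScan length (pvLengthCutoffs.zip pvExtraBits)

-- ===== PORT B =====
-- the 'while lo < hi' binary-search loop of Source B; fuel bounds the iteration count
-- (hi - lo shrinks each step, so fuel = initial hi suffices)
def pvBisect (length : Int) : Nat → Nat → Nat → Nat
  | 0, lo, _ => lo
  | fuel + 1, lo, hi =>
    if lo < hi then
      let mid := (lo + hi) / 2  -- lo, hi : Nat, so Nat division = Python's // on nonnegatives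
      if pvLengthCutoffs.getD mid 0 < length then pvBisect length fuel (mid + 1) hi
      else pvBisect length fuel lo mid
    else lo

def get_length_extra_bits_alt (length : Int) : Int :=
  let lo := pvBisect length pvLengthCutoffs.length 0 pvLengthCutoffs.length
  pvExtraBits.getD lo 0   -- lo = 29 is the ValueError case, excluded by Pre_

-- ===== PRECONDITION & SPEC =====
-- Pre_ excludes lengths above the last cutoff, where both Pythons raise ValueError.
def Pre_get_length_extra_bits (length : Int) : Prop := length ≤ 258
instance (length : Int) : Decidable (Pre_get_length_extra_bits length) := by
  unfold Pre_get_length_extra_bits; infer_instance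

def pvWitness_get_length_extra_bits : Int := 100

def Spec_get_length_extra_bits (length : Int) (out : Int) : Prop := out = get_length_extra_bits_alt length
instance (length : Int) (out : Int) : Decidable (Spec_get_length_extra_bits length out) := by unfold Spec_get_length_extra_bits; infer_instance

-- ===== CLAIM (what is proved, stated in full; the proofs are below) =====
def Claim_equal_get_length_extra_bits : Prop := ∀ (length : Int), Dom_get_length_extra_bits length → Pre_get_length_extra_bits length → Spec_get_length_extra_bits length (get_length_extra_bits length)

-- ===== LEMMAS AND PROOFS =====

-- For length ≤ 3 the scan returns its first entry
lemma scan_low (length : Int) (h : length ≤ 3) : get_length_extra_bits length = 0 := by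
  simp [get_length_extra_bits, pvScan, pvLengthCutoffs, pvExtraBits, h]

-- For length ≤ 3 every comparison 'cutoff < length' is false, so the search stays at 0
lemma bisect_low (length : Int) (h : length ≤ 3) : get_length_extra_bits_alt length = 0 := by
  have h30 : ¬ ((30:Int) < length) := by omega
  have h10 : ¬ ((10:Int) < length) := by omega
  have h6 : ¬ ((6:Int) < length) := by omega
  have h4 : ¬ ((4:Int) < length) := by omega
  have h3 : ¬ ((3:Int) < length) := by omega
  simp [get_length_extra_bits_alt, pvBisect, pvLengthCutoffs, pvExtraBits,
        h30, h10, h6, h4, h3]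

-- ===== VERDICT (by name: the statement is the Claim_ definition above) =====
set_option maxRecDepth 8192 in
theorem get_length_extra_bits_spec : Claim_equal_get_length_extra_bits := by
  intro length _ hpre
  unfold Spec_get_length_extra_bits
  unfold Pre_get_length_extra_bits at hpre
  by_cases hlow : length ≤ 3
  · rw [scan_low length hlow, bisect_low length hlow]
  · have h4 : 4 ≤ length := by omega
    interval_cases length <;> decide
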